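-- pv_equiv track=rewrite | github.com/dnwls16071/Programmers_CodingTest | 프로그래머스/unrated/135808. 과일 장수/과일 장수.py | solution
-- ===== SOURCE A (Python) =====
-- def solution(k, m, score):
--     # 배열 내림차순으로 정렬
--     score.sort(reverse=True)
--
--     # 얻을 수 있는 최대 이익
--     profit = 0
--     result = []
--     for i in range(0, len(score), m):
--         if i + m <= len(score):
--             profit += min(score[i:i+m]) * m
--     return profit
-- ===== SOURCE B (Python) =====
-- def solution(k, m, score):
--     # Frequency-count the scores, then walk the DISTINCT values in descending
--     # order; each value occupies a contiguous run [pos, pos+c) of the sorted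
--     # order, and the chosen fruits (the m-th of each full group) are exactly the
--     # positions i with i % m == m-1 below total = (n // m) * m, so each run
--     # contributes v * m * (number of multiples of m in (pos, min(pos+c, total)]).
--     if m <= 0:
--         return 0
--     counts = {}
--     for v in score:
--         counts[v] = counts.get(v, 0) + 1
--     total = (len(score) // m) * m
--     profit = 0
--     pos = 0
--     for v in sorted(counts, reverse=True):
--         c = counts[v]
--         end = min(pos + c, total)
--         if end > pos:
--             profit += v * (end // m - pos // m) * m
--         pos += c
--     return profit
-- ===== Notes on version B (the rewrite author's own statement) =====
-- stated objective: alternative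
-- what changed: A sorts the whole list descending and, for every group of m, slices out m elements and scans them with min(); B never groups or slices: it builds a frequency dict, sorts only the distinct values descending, and computes each value's contribution arithmetically from its run boundaries (number of selected positions i with i % m == m-1 inside the run), so per-element work is replaced by per-distinct-value arithmetic.
import Mathlib
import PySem

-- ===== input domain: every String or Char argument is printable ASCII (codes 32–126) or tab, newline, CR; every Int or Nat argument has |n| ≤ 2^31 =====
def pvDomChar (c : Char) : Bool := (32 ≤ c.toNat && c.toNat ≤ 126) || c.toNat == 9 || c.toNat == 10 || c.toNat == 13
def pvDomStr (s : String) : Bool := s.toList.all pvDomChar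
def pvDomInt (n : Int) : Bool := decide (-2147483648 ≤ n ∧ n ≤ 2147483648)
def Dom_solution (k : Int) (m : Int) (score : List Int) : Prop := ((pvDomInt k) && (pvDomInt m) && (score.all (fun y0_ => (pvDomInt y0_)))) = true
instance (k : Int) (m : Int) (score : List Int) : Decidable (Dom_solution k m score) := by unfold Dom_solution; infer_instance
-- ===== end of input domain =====

-- B replaces A's slice-and-min scan over every group of m by a frequency dict plus run-length
-- arithmetic over the sorted DISTINCT values; equivalence is about the RETURN value only
-- (Python A sorts `score` in place).

-- ===== PORT A =====
def solution (k : Int) (m : Int) (score : List Int) : Int :=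
  let s := PySem.List.sorted score (fun x => x) true
  let n : Int := s.length
  (PySem.List.pyRange 0 n m).foldl
    (fun profit i =>
      if i + m ≤ n then
        -- min(score[i:i+m]) * m ; the slice is nonempty whenever this branch is taken (m > 0 here)
        profit + ((PySem.List.min? (PySem.List.slice s (some i) (some (i + m))) (fun x => x)).getD 0) * m
      else profit) 0

-- ===== PORT B =====
def solution_alt (k : Int) (m : Int) (score : List Int) : Int :=
  if m ≤ 0 then 0
  else
    -- counts[v] = counts.get(v, 0) + 1
    let counts := score.foldl (fun d v => d.insert v (d.getD v 0 + 1)) PySem.Dict.empty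
    let total := PySem.Int.floordiv (score.length : Int) m * m
    -- for v in sorted(counts, reverse=True): run arithmetic on (profit, pos)
    ((PySem.List.sorted counts.keys (fun x => x) true).foldl
      (fun (st : Int × Int) v =>
        let c := counts.getD v 0
        let e := min (st.2 + c) total
        (if st.2 < e then
           st.1 + v * (PySem.Int.floordiv e m - PySem.Int.floordiv st.2 m) * m
         else st.1,
         st.2 + c))
      (0, 0)).1

-- ===== PRECONDITION & SPEC =====
-- Pre_ excludes exactly m = 0, where Python A raises ValueError (range() arg 3 must not be zero).
def Pre_solution (k : Int) (m : Int) (score : List Int) : Prop := m ≠ 0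
instance (k : Int) (m : Int) (score : List Int) : Decidable (Pre_solution k m score) := by unfold Pre_solution; infer_instance
def pvWitness_solution : Int × Int × List Int := (4, 2, [4, 1, 3, 2, 5])

def Spec_solution (k : Int) (m : Int) (score : List Int) (out : Int) : Prop := out = solution_alt k m score
instance (k : Int) (m : Int) (score : List Int) (out : Int) : Decidable (Spec_solution k m score out) := by unfold Spec_solution; infer_instance

-- ===== CLAIM (what is proved, stated in full; the proofs are below) =====
def Claim_equal_solution : Prop := ∀ (k : Int) (m : Int) (score : List Int), Dom_solution k m score → Pre_solution k m score → Spec_solution k m score (solution k m score)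

-- ===== LEMMAS AND PROOFS =====

-- reverse=True sorting of Int values (identity key) is the reverse of the ascending sort
lemma sorted_rev_eq_reverse (xs : List Int) :
    PySem.List.sorted xs (fun x => x) true = (PySem.List.sorted xs (fun x => x) false).reverse := by
  have h := PySem.List.eq_of_perm_of_pairwise_le_of_injective
    (l₁ := (PySem.List.sorted xs (fun x => x) true).reverse)
    (l₂ := PySem.List.sorted xs (fun x => x) false) (fun x => x) (fun a b h => h)
    ((((PySem.List.sorted xs (fun x => x) true).reverse_perm).trans
      (PySem.List.sorted_perm xs (fun x => x) true)).trans
      (PySem.List.sorted_perm xs (fun x => x) false).symm)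
    ?_ ?_
  · have := congrArg List.reverse h
    simpa using this
  · rw [List.pairwise_reverse]
    exact PySem.List.sorted_pairwise_rev xs (fun x => x)
  · exact PySem.List.sorted_pairwise xs (fun x => x)

-- running min over a non-increasing list is its last element
lemma foldl_min_desc (t : List Int) (x : Int)
    (h : (x :: t).Pairwise (fun a b => b ≤ a)) :
    t.foldl min x = (x :: t).getLast (by simp) := by
  induction t generalizing x with
  | nil => simp
  | cons y t ih =>
    have hyx : y ≤ x := (List.pairwise_cons.1 h).1 y (by simp)
    have ht : (y :: t).Pairwise (fun a b => b ≤ a) := (List.pairwise_cons.1 h).2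
    have : min x y = y := min_eq_right hyx
    simp only [List.foldl_cons, this]
    rw [ih y ht]
    simp [List.getLast_cons]

-- min of a nonempty window of a non-increasing list is the window's last element
lemma min_window_desc (r : List Int) (a M : Nat) (hM : 0 < M)
    (hr : r.Pairwise (fun a b => b ≤ a)) (hle : a + M ≤ r.length) :
    PySem.List.min? ((r.drop a).take M) (fun x => x) = some (r.getD (a + M - 1) 0) := by
  have hw : ((r.drop a).take M).Pairwise (fun a b => b ≤ a) :=
    ((hr.drop (i := a)).sublist (List.take_sublist _ _))
  have hlen : ((r.drop a).take M).length = M := by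
    rw [List.length_take, List.length_drop]; omega
  obtain ⟨x, t, hxt⟩ : ∃ x t, (r.drop a).take M = x :: t := by
    cases h : (r.drop a).take M with
    | nil => rw [h] at hlen; simp at hlen; omega
    | cons x t => exact ⟨x, t, rfl⟩
  rw [hxt]
  rw [PySem.List.min?_id_cons]
  rw [foldl_min_desc t x (hxt ▸ hw)]
  congr 1
  have h1 : (x :: t).getLast (by simp) = ((r.drop a).take M).getLast (by rw [hxt]; simp) := by
    congr 1; exact hxt.symm
  rw [h1]
  have h2 : ((r.drop a).take M).getLast (by intro hcon; rw [hcon] at hlen; simp at hlen; omega)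
      = ((r.drop a).take M).getD (M - 1) 0 := by
    rw [List.getLast_eq_getElem]
    rw [List.getD_eq_getElem]; · congr 1; omega
    · omega
  rw [h2]
  rw [List.getD_eq_getElem, List.getD_eq_getElem]
  · rw [List.getElem_take, List.getElem_drop]; congr 1; omega
  · omega
  · rw [hlen]; omega

lemma filter_range_eq (c q : Nat) (p : Nat → Bool) (hq : q ≤ c)
    (h1 : ∀ k, k < q → p k = true) (h2 : ∀ k, q ≤ k → ¬ p k = true) :
    (List.range c).filter p = List.range q := by
  rw [show c = q + (c - q) by omega, List.range_add, List.filter_append]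
  rw [List.filter_eq_self.2 (fun k hk => h1 k (List.mem_range.1 hk))]
  rw [List.filter_eq_nil_iff.2 (fun k hk => by
    simp only [List.mem_map, List.mem_range] at hk
    obtain ⟨j, _, rfl⟩ := hk
    exact h2 _ (by omega))]
  simp

-- counting an interval inside range n
lemma countP_interval (a b n : Nat) :
    (List.range n).countP (fun j => decide (a ≤ j ∧ j < b)) = min b n - min a n := by
  induction n with
  | zero => simp
  | succ n ih =>
    rw [List.range_succ, List.countP_append, ih]
    by_cases h : a ≤ n ∧ n < b
    · simp [h]; omega
    · simp only [List.countP_cons, List.countP_nil]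
      rw [decide_eq_false h]
      simp; omega

-- the count of each value in a flatMap of replicates over distinct values
lemma count_flatMap_replicate (g : Int → Nat) (L : List Int) (x : Int) (hnd : L.Nodup) :
    (L.flatMap (fun v => List.replicate (g v) v)).count x = if x ∈ L then g x else 0 := by
  induction L with
  | nil => simp
  | cons v L ih =>
    rw [List.flatMap_cons, List.count_append, List.count_replicate, ih hnd.of_cons]
    by_cases hxv : v = x
    · subst hxv
      have hnv : v ∉ L := (List.nodup_cons.1 hnd).1
      simp [hnv]
    · simp [hxv, Ne.symm hxv, List.mem_cons]

-- flatMap of replicates over a strictly increasing value list is non-decreasing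
lemma pairwise_flatMap_replicate (g : Int → Nat) (L : List Int)
    (h : L.Pairwise (fun a b => a < b)) :
    (L.flatMap (fun v => List.replicate (g v) v)).Pairwise (fun a b => a ≤ b) := by
  induction L with
  | nil => simp
  | cons v L ih =>
    rw [List.flatMap_cons, List.pairwise_append]
    refine ⟨List.pairwise_replicate.2 (Or.inr le_rfl), ih (List.pairwise_cons.1 h).2, ?_⟩
    intro a ha b hb
    obtain ⟨u, hu, hbu⟩ := List.mem_flatMap.1 hb
    have hau : a = v := List.eq_of_mem_replicate ha
    have hbu' : b = u := List.eq_of_mem_replicate hbu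
    rw [hau, hbu']
    exact le_of_lt ((List.pairwise_cons.1 h).1 u hu)

-- sorted ascending = ascending distinct values, each replicated by its multiplicity
lemma asc_runs (score : List Int) :
    PySem.List.sorted score (fun x => x) false
      = (PySem.List.sorted (PySem.Set.ofList score) (fun x => x) false).flatMap
          (fun v => List.replicate (score.count v) v) := by
  set Ka := PySem.List.sorted (PySem.Set.ofList score) (fun x => x) false with hKa
  have hnd : Ka.Nodup :=
    ((PySem.List.sorted_perm (PySem.Set.ofList score) (fun x => x) false).nodup_iff).2
      (PySem.Set.nodup_ofList score)
  have hperm : (Ka.flatMap (fun v => List.replicate (score.count v) v)).Perm score := by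
    rw [List.perm_iff_count]
    intro x
    rw [count_flatMap_replicate (fun v => score.count v) Ka x hnd]
    by_cases hx : x ∈ score
    · rw [if_pos]
      rw [PySem.List.mem_sorted, PySem.Set.mem_ofList]
      exact hx
    · rw [if_neg, Eq.comm, List.count_eq_zero]
      · exact hx
      · rw [PySem.List.mem_sorted, PySem.Set.mem_ofList]
        exact hx
  exact PySem.List.eq_of_perm_of_pairwise_le_of_injective (fun x => x) (fun a b h => h)
    ((PySem.List.sorted_perm score (fun x => x) false).trans hperm.symm)
    (PySem.List.sorted_pairwise score (fun x => x))
    (pairwise_flatMap_replicate _ _ (PySem.List.sorted_ofList_pairwise_lt score))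

-- sorted descending = descending distinct values, each replicated by its multiplicity
lemma desc_runs (score : List Int) :
    PySem.List.sorted score (fun x => x) true
      = (PySem.List.sorted (PySem.Set.ofList score) (fun x => x) true).flatMap
          (fun v => List.replicate (score.count v) v) := by
  rw [sorted_rev_eq_reverse score, asc_runs score, List.reverse_flatMap,
    sorted_rev_eq_reverse (PySem.Set.ofList score)]
  simp [Function.comp_def, List.reverse_replicate]

-- B's run-arithmetic loop, generalized over the remaining distinct values L and start position p:
-- it adds m times the value at every selected position (index ≡ M-1 mod M, below q*M) that falls
-- inside the runs spelled out by L.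
lemma fold_runs (g : Int → Nat) (m total : Int) (M q : Nat) (hM : 0 < M)
    (hm : m = (M : Int)) (htot : total = ((q * M : Nat) : Int)) :
    ∀ (L : List Int) (p : Nat) (profit : Int),
    (L.foldl (fun (st : Int × Int) v =>
        (if st.2 < min (st.2 + ((g v : Nat) : Int)) total then
           st.1 + v * (PySem.Int.floordiv (min (st.2 + ((g v : Nat) : Int)) total) m
             - PySem.Int.floordiv st.2 m) * m
         else st.1,
         st.2 + ((g v : Nat) : Int))) (profit, ((p : Nat) : Int))).1
      = profit + ((List.range q).map (fun j =>
          if p ≤ j * M + M - 1 ∧ j * M + M - 1 < p + (L.flatMap (fun v => List.replicate (g v) v)).length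
          then (L.flatMap (fun v => List.replicate (g v) v)).getD (j * M + M - 1 - p) 0 * m
          else 0)).sum := by
  intro L
  induction L with
  | nil =>
    intro p profit
    rw [List.foldl_nil, List.flatMap_nil, List.length_nil]
    rw [List.map_congr_left (g := fun _ : Nat => (0 : Int)) (fun j _ => by rw [if_neg]; omega)]
    simp
  | cons v L ih =>
    intro p profit
    rw [List.foldl_cons]
    set c := g v with hc
    have hpos : ((p : Nat) : Int) + ((c : Nat) : Int) = ((p + c : Nat) : Int) := by push_cast; ring
    rw [hpos, ih (p + c)]
    set rest := L.flatMap (fun v => List.replicate (g v) v) with hrest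
    rw [List.flatMap_cons, ← hrest]
    set E := min (p + c) (q * M) with hE
    have hmin : min (((p + c : Nat)) : Int) total = ((E : Nat) : Int) := by
      rw [htot, hE]; push_cast; ring_nf
    rw [hmin]
    -- split each summand at the boundary p + c of the first run
    have hsplit : ∀ j ∈ List.range q,
        (if p ≤ j * M + M - 1 ∧ j * M + M - 1 < p + (List.replicate c v ++ rest).length
         then (List.replicate c v ++ rest).getD (j * M + M - 1 - p) 0 * m else 0)
        = (if p ≤ j * M + M - 1 ∧ j * M + M - 1 < p + c then v * m else 0)
          + (if p + c ≤ j * M + M - 1 ∧ j * M + M - 1 < (p + c) + rest.length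
             then rest.getD (j * M + M - 1 - (p + c)) 0 * m else 0) := by
      intro j _
      have hlen : (List.replicate c v ++ rest).length = c + rest.length := by
        rw [List.length_append, List.length_replicate]
      by_cases h1 : p ≤ j * M + M - 1 ∧ j * M + M - 1 < p + c
      · rw [if_pos ⟨h1.1, by omega⟩, if_pos h1, if_neg (by omega), add_zero]
        have hv : (List.replicate c v ++ rest).getD (j * M + M - 1 - p) 0 = v := by
          rw [List.getD_eq_getElem _ _ (by rw [hlen]; omega)]
          rw [List.getElem_append_left (by rw [List.length_replicate]; omega)]
          exact List.getElem_replicate _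
        rw [hv]
      · by_cases h2 : p + c ≤ j * M + M - 1 ∧ j * M + M - 1 < (p + c) + rest.length
        · rw [if_pos ⟨by omega, by omega⟩, if_neg h1, if_pos h2, zero_add]
          have hv : (List.replicate c v ++ rest).getD (j * M + M - 1 - p) 0
              = rest.getD (j * M + M - 1 - (p + c)) 0 := by
            rw [List.getD_eq_getElem?_getD, List.getD_eq_getElem?_getD]
            rw [List.getElem?_append_right (by rw [List.length_replicate]; omega)]
            rw [List.length_replicate]
            congr 2
            omega
          rw [hv]
        · rw [if_neg (by omega), if_neg h1, if_neg h2, add_zero]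
    rw [List.map_congr_left hsplit, PySem.List.sum_map_add_int]
    -- first-run sum = v * m * (number of selected positions in the first run)
    have hone : ∀ j ∈ List.range q,
        (if p ≤ j * M + M - 1 ∧ j * M + M - 1 < p + c then v * m else 0)
        = v * m * (if (fun j => decide (p / M ≤ j ∧ j < E / M)) j = true then (1 : Int) else 0) := by
      intro j hj
      have hjq := List.mem_range.1 hj
      have hiff : (p ≤ j * M + M - 1 ∧ j * M + M - 1 < p + c) ↔ (p / M ≤ j ∧ j < E / M) := by
        have hmul : (j + 1) * M = j * M + M := by ring
        constructor
        · rintro ⟨ha, hb⟩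
          have hp1 : p < (j + 1) * M := by omega
          have hd1 : p / M < j + 1 := (Nat.div_lt_iff_lt_mul hM).2 hp1
          have h3 : (j + 1) * M ≤ p + c := by omega
          have h4 : (j + 1) * M ≤ q * M := Nat.mul_le_mul_right M (by omega)
          have h5 : (j + 1) * M ≤ E := le_min h3 h4
          have hd2 : j + 1 ≤ E / M := (Nat.le_div_iff_mul_le hM).2 h5
          exact ⟨by omega, by omega⟩
        · rintro ⟨ha, hb⟩
          have h3 : (j + 1) * M ≤ E := (Nat.le_div_iff_mul_le hM).1 (by omega)
          have h4 : p < (j + 1) * M := (Nat.div_lt_iff_lt_mul hM).1 (by omega)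
          have h6 : (j + 1) * M ≤ p + c := le_trans h3 (min_le_left _ _)
          exact ⟨by omega, by omega⟩
      by_cases h : p ≤ j * M + M - 1 ∧ j * M + M - 1 < p + c
      · rw [if_pos h, if_pos (by simpa using hiff.1 h)]
        ring
      · rw [if_neg h, if_neg, mul_zero]
        simp only [decide_eq_true_eq]
        intro hcon
        exact h (hiff.2 hcon)
    rw [List.map_congr_left hone, List.sum_map_mul_left, PySem.List.sum_map_ite_one_zero,
      countP_interval]
    -- close the per-step accounting
    have hEdq : E / M ≤ q := by
      have h1 : E ≤ q * M := min_le_right _ _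
      have h2 : E / M ≤ (q * M) / M := Nat.div_le_div_right h1
      rw [Nat.mul_div_cancel q hM] at h2
      exact h2
    rw [min_eq_left hEdq]
    have hfd : PySem.Int.floordiv ((E : Nat) : Int) m - PySem.Int.floordiv ((p : Nat) : Int) m
        = ((E / M : Nat) : Int) - ((p / M : Nat) : Int) := by
      rw [hm, PySem.Int.floordiv_natCast, PySem.Int.floordiv_natCast]
    by_cases hpe : ((p : Nat) : Int) < ((E : Nat) : Int)
    · have hpE : p < E := by exact_mod_cast hpe
      have hpq : p / M < q := by
        have : p < q * M := lt_of_lt_of_le hpE (min_le_right _ _)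
        exact (Nat.div_lt_iff_lt_mul hM).2 this
      rw [if_pos hpe, hfd, min_eq_left (by omega)]
      have hdle : p / M ≤ E / M := Nat.div_le_div_right (le_of_lt hpE)
      rw [Nat.cast_sub hdle]
      ring
    · have hEp : E ≤ p := by
        have : ((E : Nat) : Int) ≤ ((p : Nat) : Int) := le_of_not_gt hpe
        exact_mod_cast this
      have hdle : E / M ≤ p / M := Nat.div_le_div_right hEp
      rw [if_neg hpe]
      have hz : E / M - min (p / M) q = 0 := by omega
      rw [hz]
      push_cast
      ring

-- A's value, as m times the sum of the selected entries of the descending sort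
lemma A_eq (k m : Int) (score : List Int) (M : Nat) (hM : 0 < M) (hm : m = (M : Int)) :
    solution k m score
      = ((List.range (score.length / M)).map
          (fun j => (PySem.List.sorted score (fun x => x) true).getD (j * M + M - 1) 0 * m)).sum := by
  have hm0 : (0 : Int) < m := by rw [hm]; exact_mod_cast hM
  simp only [solution]
  set d := PySem.List.sorted score (fun x => x) true with hd
  have hrp : d.Pairwise (fun a b => b ≤ a) := PySem.List.sorted_pairwise_rev score (fun x => x)
  have hdlen : d.length = score.length := PySem.List.length_sorted score (fun x => x) true
  set N := score.length with hN
  set q := N / M with hq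
  have hgrp : ∀ j : Nat, j < q → M + M * j ≤ N := by
    intro j hj
    have : j + 1 ≤ N / M := hj
    have := (Nat.le_div_iff_mul_le hM).1 this
    calc M + M * j = (j + 1) * M := by ring
      _ ≤ N := this
  rw [hdlen]
  rw [PySem.List.pyRange_of_pos 0 (N : Int) hm0]
  rw [PySem.List.foldl_ite_eq_foldl_filter]
  rw [List.filter_map]
  rw [filter_range_eq _ q _ ?hqle ?h1 ?h2]
  case hqle =>
    split_ifs with hpos
    · have e1 : ((N : Int)) / m = ((q : Nat) : Int) := by
        rw [hm, hq]; exact_mod_cast (Int.natCast_div N M).symm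
      have e2 : ((N : Int)) / m ≤ (((N : Int)) - 0 + m - 1) / m :=
        Int.ediv_le_ediv hm0 (by omega)
      have : ((q : Int)) ≤ ((((N : Int)) - 0 + m - 1) / m) := by rw [← e1]; exact e2
      omega
    · have hN0 : N = 0 := by
        by_contra hne
        exact hpos (by exact_mod_cast Nat.pos_of_ne_zero hne)
      simp [hq, hN0]
  case h1 =>
    intro j hj
    have h' := hgrp j hj
    simp only [Function.comp_apply, decide_eq_true_eq]
    rw [hm]
    push_cast at h' ⊢
    linarith
  case h2 =>
    intro j hj
    have : N / M < j + 1 := by omega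
    have hlt : N < (j + 1) * M := (Nat.div_lt_iff_lt_mul hM).1 this
    simp only [Function.comp_apply, decide_eq_true_eq]
    rw [hm]
    push_cast at hlt ⊢
    intro hcon
    nlinarith
  rw [List.foldl_map]
  rw [PySem.List.foldl_add]
  rw [zero_add]
  apply congrArg
  apply List.map_congr_left
  intro j hj
  have hj' : j < q := List.mem_range.1 hj
  have h' := hgrp j hj'
  have e1 : (0 + m * (j : Int)) = ((M * j : Nat) : Int) := by rw [hm]; push_cast; ring
  have e2 : ((M * j : Nat) : Int) + m = ((M * j : Nat) : Int) + ((M : Nat) : Int) := by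
    rw [← hm]
  rw [e1, e2, PySem.List.slice_natCast_add]
  rw [min_window_desc d (M * j) M hM hrp (by omega)]
  rw [Option.getD_some, Nat.mul_comm M j]

-- B's value, as m times the sum of the selected entries of the descending sort
lemma B_eq (k m : Int) (score : List Int) (M : Nat) (hM : 0 < M) (hm : m = (M : Int)) :
    solution_alt k m score
      = ((List.range (score.length / M)).map
          (fun j => (PySem.List.sorted score (fun x => x) true).getD (j * M + M - 1) 0 * m)).sum := by
  have hm1 : (1 : Int) ≤ m := by rw [hm]; exact_mod_cast hM
  unfold solution_alt
  rw [if_neg (by omega)]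
  simp only [PySem.Dict.foldl_insert_getD_add_one_eq_counter, PySem.Dict.getD_counter,
    PySem.Dict.keys_counter]
  set N := score.length with hN
  set q := N / M with hq
  have htot : PySem.Int.floordiv ((N : Nat) : Int) m * m = ((q * M : Nat) : Int) := by
    rw [hm, PySem.Int.floordiv_natCast, hq, Nat.cast_mul]
  rw [htot]
  have hfold := fold_runs (fun v => score.count v) m ((q * M : Nat) : Int) M q hM hm rfl
    (PySem.List.sorted (PySem.Set.ofList score) (fun x => x) true) 0 0
  simp only [Nat.cast_zero, Nat.sub_zero, zero_add] at hfold
  rw [hfold]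
  rw [← desc_runs score]
  have hdlen : (PySem.List.sorted score (fun x => x) true).length = N :=
    PySem.List.length_sorted score (fun x => x) true
  rw [hdlen]
  apply congrArg
  apply List.map_congr_left
  intro j hj
  have hj' : j < q := List.mem_range.1 hj
  have h1 : (j + 1) * M ≤ q * M := Nat.mul_le_mul_right M (by omega)
  have h2 : q * M ≤ N := by rw [hq]; exact Nat.div_mul_le_self N M
  have h3 : (j + 1) * M = j * M + M := by ring
  rw [if_pos (by omega)]

-- ===== VERDICT (by name: the statement is the Claim_ definition above) =====
theorem solution_spec : Claim_equal_solution := by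
  intro k m score _ hpre
  unfold Spec_solution
  by_cases hmle : m ≤ 0
  · -- m < 0 (m = 0 is excluded): A's range(0, n, m) is empty, B's guard returns 0
    simp only [solution, solution_alt]
    have h1 : ¬ (0 : Int) < m := not_lt.2 hmle
    have h2 : ¬ ((score.length : Int) < 0) := not_lt.2 (Int.natCast_nonneg _)
    simp [PySem.List.pyRange, h1, h2, hmle]
  · have hmle' : 0 < m := by omega
    have hm : m = ((m.toNat : Nat) : Int) := (Int.toNat_of_nonneg hmle'.le).symm
    have hM : 0 < m.toNat := by omega
    rw [A_eq k m score m.toNat hM hm, B_eq k m score m.toNat hM hm]
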